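-- pv_equiv track=rewrite | github.com/ASK1995/Leetcode | 3581.py | countOddLetters
-- ===== SOURCE A (Python) =====
-- from collections import Counter
--
-- def countOddLetters(n: int) -> int:
--     s = ""
--     converter = {0:"zero", 1:"one", 2:"two", 3:"three",
--     4:"four", 5:"five", 6:"six", 7:"seven", 8:"eight", 9:"nine"}
--     for letter in str(n):
--         s += converter[int(letter)]
--
--     count = Counter(s)
--     return sum(1 for key, value in count.items() if value % 2 != 0)
-- ===== SOURCE B (Python) =====
-- def countOddLetters(n: int) -> int:
--     # per-digit parity signature: the letters occurring an ODD number of times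
--     # in the digit's English word ("three" -> "thr", "seven" -> "svn", "nine" -> "ie")
--     PARITY = ("zero", "one", "two", "thr", "four", "five", "six", "svn", "eight", "ie")
--     odd = frozenset()
--     for d in str(n):
--         odd ^= frozenset(PARITY[int(d)])
--     return len(odd)
-- ===== Notes on version B (the rewrite author's own statement) =====
-- stated objective: alternative
-- what changed: Replaces the build-string/Counter/filter-odd pipeline by a fold of precomputed per-digit parity signatures (the letters with odd multiplicity in each digit's word) combined with set symmetric difference, so no per-letter counting and no final filtering scan remain.
import Mathlib
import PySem

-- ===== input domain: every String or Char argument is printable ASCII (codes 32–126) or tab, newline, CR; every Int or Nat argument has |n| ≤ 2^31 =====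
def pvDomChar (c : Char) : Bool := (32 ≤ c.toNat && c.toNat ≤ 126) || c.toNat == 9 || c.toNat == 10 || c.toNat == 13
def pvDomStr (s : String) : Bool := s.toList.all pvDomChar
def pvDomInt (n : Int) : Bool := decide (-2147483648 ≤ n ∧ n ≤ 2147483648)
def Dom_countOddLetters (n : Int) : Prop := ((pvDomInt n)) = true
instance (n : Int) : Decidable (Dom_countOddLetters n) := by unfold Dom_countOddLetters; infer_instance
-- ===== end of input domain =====

-- B replaces A's build-string / Counter / filter-odd pipeline by a symmetric-difference fold of
-- precomputed per-digit parity signatures (objective: alternative algorithm, same cost).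

-- ===== PORT A =====
def countOddLetters (n : Int) : Int :=
  let converter : PySem.Dict Int String := PySem.Dict.ofList
    [(0, "zero"), (1, "one"), (2, "two"), (3, "three"), (4, "four"),
     (5, "five"), (6, "six"), (7, "seven"), (8, "eight"), (9, "nine")]
  -- s += converter[int(letter)]; on Pre_ every letter is a digit, so the two getD defaults never fire
  let s : List Char := (PySem.Int.toStr n).toList.foldl
    (fun acc letter => acc ++ ((converter.get? ((PySem.Int.ofChars? [letter]).getD (-1))).getD "").toList) []
  let count := PySem.Dict.counter s
  (count.items.map (fun kv => if PySem.Int.mod kv.2 2 ≠ 0 then (1 : Int) else 0)).sum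

-- ===== PORT B =====
def countOddLetters_alt (n : Int) : Int :=
  -- PARITY[d] = letters with odd multiplicity in digit d's English word
  let parity : List String := ["zero", "one", "two", "thr", "four", "five", "six", "svn", "eight", "ie"]
  -- odd ^= frozenset(PARITY[int(d)]); on Pre_ every d is a digit, so the getD defaults never fire
  let odd : PySem.Set Char := (PySem.Int.toStr n).toList.foldl
    (fun t d => PySem.Set.symmDiff t
      (PySem.Set.ofList ((PySem.List.pyGet? parity ((PySem.Int.ofChars? [d]).getD 10)).getD "").toList))
    PySem.Set.empty
  PySem.Set.len odd

-- ===== PRECONDITION & SPEC =====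
-- Pre_ excludes exactly the inputs where the Python A raises: for n < 0, str(n) starts with '-'
-- and int('-') raises ValueError (B raises there too).
def Pre_countOddLetters (n : Int) : Prop := 0 ≤ n
instance (n : Int) : Decidable (Pre_countOddLetters n) := by unfold Pre_countOddLetters; infer_instance
def pvWitness_countOddLetters : Int := 5

def Spec_countOddLetters (n : Int) (out : Int) : Prop := out = countOddLetters_alt n
instance (n : Int) (out : Int) : Decidable (Spec_countOddLetters n out) := by unfold Spec_countOddLetters; infer_instance

-- ===== CLAIM (what is proved, stated in full; the proofs are below) =====
def Claim_equal_countOddLetters : Prop := ∀ (n : Int), Dom_countOddLetters n → Pre_countOddLetters n → Spec_countOddLetters n (countOddLetters n)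

-- ===== LEMMAS AND PROOFS =====

def pvDigits : List Char := ['0', '1', '2', '3', '4', '5', '6', '7', '8', '9']

-- every char produced by Nat.toDigitsCore on digits already in pvDigits stays in pvDigits
theorem pvToDigitsCore_subset (fuel : Nat) : ∀ (m : Nat) (ds : List Char),
    (∀ c ∈ ds, c ∈ pvDigits) → ∀ c ∈ Nat.toDigitsCore 10 fuel m ds, c ∈ pvDigits := by
  induction fuel with
  | zero => intro m ds hds c hc; exact hds c hc
  | succ f ih =>
    intro m ds hds c hc
    simp only [Nat.toDigitsCore] at hc
    have hdig : (m % 10).digitChar ∈ pvDigits := by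
      have : m % 10 < 10 := Nat.mod_lt _ (by omega)
      interval_cases h : m % 10 <;> decide
    by_cases h0 : m / 10 = 0
    · rw [if_pos h0] at hc
      rcases List.mem_cons.mp hc with h | h
      · exact h ▸ hdig
      · exact hds c h
    · rw [if_neg h0] at hc
      exact ih (m / 10) _ (fun c' hc' => by
        rcases List.mem_cons.mp hc' with h | h
        · exact h ▸ hdig
        · exact hds c' h) c hc

theorem pvToChars_digits (n : Int) (hn : 0 ≤ n) : ∀ c ∈ PySem.Int.toChars n, c ∈ pvDigits := by
  unfold PySem.Int.toChars
  rw [if_neg (by omega)]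
  exact pvToDigitsCore_subset _ _ _ (by intro c hc; simp at hc)

-- a finite (boolean) check on the letters occurring in w or p suffices for the parity characterisation
theorem pvParity_spec (w p : List Char)
    (h : ((w ++ p).all (fun c => decide (c ∈ p) == decide (List.count c w % 2 = 1))) = true) :
    ∀ c, c ∈ p ↔ List.count c w % 2 = 1 := by
  intro c
  by_cases hc : c ∈ w ++ p
  · have hb := List.all_eq_true.mp h c hc
    rw [beq_iff_eq, decide_eq_decide] at hb
    exact hb
  · rw [List.mem_append] at hc
    push Not at hc
    constructor
    · intro hp; exact absurd hp hc.2
    · intro hcount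
      rw [List.count_eq_zero_of_not_mem hc.1] at hcount
      omega

-- parity invariant of the symmetric-difference fold
theorem pvSymm_invariant (g : Char → List Char) (q : Char → PySem.Set Char)
    (L : List Char) (t : PySem.Set Char) (ht : t.Nodup)
    (hqnd : ∀ ch ∈ L, (q ch).Nodup)
    (hq : ∀ ch ∈ L, ∀ c, c ∈ q ch ↔ List.count c (g ch) % 2 = 1) :
    (L.foldl (fun t ch => PySem.Set.symmDiff t (q ch)) t).Nodup ∧
      ∀ c, (c ∈ L.foldl (fun t ch => PySem.Set.symmDiff t (q ch)) t ↔
        Xor' (c ∈ t) (List.count c (L.flatMap g) % 2 = 1)) := by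
  induction L generalizing t with
  | nil => exact ⟨ht, fun c => by simp [Xor']⟩
  | cons x xs ih =>
    have hnd' : (PySem.Set.symmDiff t (q x)).Nodup :=
      PySem.Set.nodup_symmDiff t (q x) ht (hqnd x List.mem_cons_self)
    obtain ⟨h1, h2⟩ := ih (PySem.Set.symmDiff t (q x)) hnd'
      (fun ch hch => hqnd ch (List.mem_cons_of_mem _ hch))
      (fun ch hch => hq ch (List.mem_cons_of_mem _ hch))
    refine ⟨h1, fun c => ?_⟩
    rw [List.foldl_cons, h2 c]
    have hx := hq x (List.mem_cons_self) c
    rw [PySem.Set.mem_symmDiff]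
    have hcnt : List.count c ((x :: xs).flatMap g)
        = List.count c (g x) + List.count c (xs.flatMap g) := by
      rw [List.flatMap_cons, List.count_append]
    rw [hcnt]
    have hsum : (List.count c (g x) + List.count c (xs.flatMap g)) % 2 = 1 ↔
        ¬ (List.count c (g x) % 2 = 1 ↔ List.count c (xs.flatMap g) % 2 = 1) := by omega
    simp only [Xor', hx, hsum]
    tauto

-- the 0/1 sum over a key list equals the length of the odd-count filter
theorem pvSum (s : List Char) (S : List Char) :
    (S.map (fun k => if PySem.Int.mod ((List.count k s : Nat) : Int) 2 ≠ 0 then (1 : Int) else 0)).sum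
      = ((S.filter (fun k => decide (List.count k s % 2 = 1))).length : Int) := by
  induction S with
  | nil => simp
  | cons x xs ih =>
    simp only [List.map_cons, List.sum_cons, List.filter_cons, ih]
    have hmod : PySem.Int.mod ((List.count x s : Nat) : Int) 2 = ((List.count x s % 2 : Nat) : Int) :=
      PySem.Int.mod_natCast _ _
    by_cases h : List.count x s % 2 = 1
    · rw [hmod]
      simp [h]
      ring
    · have h0 : List.count x s % 2 = 0 := by omega
      rw [hmod, h0]
      simp

-- the whole pipeline: A's Counter sum equals B's symmetric-difference fold size
theorem pvMain (g : Char → List Char) (q : Char → PySem.Set Char) (L : List Char)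
    (hqnd : ∀ ch ∈ L, (q ch).Nodup)
    (hq : ∀ ch ∈ L, ∀ c, c ∈ q ch ↔ List.count c (g ch) % 2 = 1) :
    ((PySem.Dict.counter (L.foldl (fun acc letter => acc ++ g letter) ([] : List Char))).items.map
        (fun kv => if PySem.Int.mod kv.2 2 ≠ 0 then (1 : Int) else 0)).sum
      = PySem.Set.len (L.foldl (fun t ch => PySem.Set.symmDiff t (q ch)) PySem.Set.empty) := by
  rw [PySem.List.foldl_append_eq_flatMap g L ([] : List Char), List.nil_append]
  rw [PySem.Dict.items_counter]
  rw [List.map_map]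
  have hcomp :
      ((fun kv : Char × Int => if PySem.Int.mod kv.2 2 ≠ 0 then (1 : Int) else 0) ∘
        (fun k => (k, (List.count k (L.flatMap g) : Int))))
      = fun k => if PySem.Int.mod ((List.count k (L.flatMap g) : Nat) : Int) 2 ≠ 0 then (1 : Int) else 0 := rfl
  rw [hcomp, pvSum]
  obtain ⟨hnd, hmem⟩ := pvSymm_invariant g q L PySem.Set.empty List.nodup_nil hqnd hq
  have hperm :
      ((PySem.Set.ofList (L.flatMap g)).filter (fun k => decide (List.count k (L.flatMap g) % 2 = 1))).Perm
        (L.foldl (fun t ch => PySem.Set.symmDiff t (q ch)) PySem.Set.empty) := by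
    rw [List.perm_ext_iff_of_nodup ((PySem.Set.nodup_ofList _).filter _) hnd]
    intro c
    rw [List.mem_filter, PySem.Set.mem_ofList, hmem c]
    constructor
    · rintro ⟨_, hodd⟩
      exact Or.inr ⟨by simpa using hodd, by simp [PySem.Set.empty]⟩
    · rintro (⟨h, _⟩ | ⟨hodd, _⟩)
      · simp [PySem.Set.empty] at h
      · have hodd' : List.count c (L.flatMap g) % 2 = 1 := hodd
        refine ⟨List.count_pos_iff.mp (by omega), by simpa using hodd'⟩
  have hlen := hperm.length_eq
  have hset : PySem.Set.len (L.foldl (fun t ch => PySem.Set.symmDiff t (q ch)) PySem.Set.empty)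
      = ((L.foldl (fun t ch => PySem.Set.symmDiff t (q ch)) PySem.Set.empty).length : Int) := by
    simp [PySem.Set.len]
  rw [hset, ← hlen]

set_option maxRecDepth 4096 in
theorem pvPorts_eq (n : Int) (hn : 0 ≤ n) : countOddLetters n = countOddLetters_alt n := by
  unfold countOddLetters countOddLetters_alt
  rw [PySem.Int.toList_toStr]
  apply pvMain
  · intro ch _
    exact PySem.Set.nodup_ofList _
  · intro ch hch
    have hd := pvToChars_digits n hn ch hch
    fin_cases hd <;> (apply pvParity_spec; decide)

-- ===== VERDICT (by name: the statement is the Claim_ definition above) =====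
theorem countOddLetters_spec : Claim_equal_countOddLetters := by
  intro n _ hpre
  unfold Spec_countOddLetters
  exact pvPorts_eq n hpre
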